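-- pv_equiv track=rewrite | github.com/ryanklee/hapax-council | shared/sdlc_status.py | _derive_stage
-- ===== SOURCE A (Python) =====
-- def _derive_stage(labels: list[str]) -> str:
--     """Derive pipeline stage from GitHub labels."""
--     label_names = {lb if isinstance(lb, str) else lb.get("name", "") for lb in labels}
--     if "axiom:blocked" in label_names:
--         return "axiom-blocked"
--     if "sdlc:ready-for-human" in label_names:
--         return "ready-for-human"
--     if "needs-human" in label_names:
--         return "needs-human"
--     for lb in label_names:
--         if lb.startswith("review-round:"):
--             return "in-review"
--     if "agent-authored" in label_names:
--         return "awaiting-review"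
--     if "sdlc:implementing" in label_names:
--         return "implementing"
--     if "sdlc:planning" in label_names:
--         return "planning"
--     if "sdlc:triaged" in label_names:
--         return "triaged"
--     if "agent-eligible" in label_names:
--         return "triage-pending"
--     return "unknown"
-- ===== SOURCE B (Python) =====
-- _STAGES = [
--     "axiom-blocked",
--     "ready-for-human",
--     "needs-human",
--     "in-review",
--     "awaiting-review",
--     "implementing",
--     "planning",
--     "triaged",
--     "triage-pending",
-- ]
--
-- _TRIGGER = {
--     "axiom:blocked": 0,
--     "sdlc:ready-for-human": 1,
--     "needs-human": 2,
--     "agent-authored": 4,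
--     "sdlc:implementing": 5,
--     "sdlc:planning": 6,
--     "sdlc:triaged": 7,
--     "agent-eligible": 8,
-- }
--
--
-- def _priority(name: str) -> int:
--     i = _TRIGGER.get(name)
--     if i is not None:
--         return i
--     return 3 if name.startswith("review-round:") else 9
--
--
-- def _derive_stage(labels: list[str]) -> str:
--     best = 9
--     for lb in labels:
--         name = lb if isinstance(lb, str) else lb.get("name", "")
--         best = min(best, _priority(name))
--     return _STAGES[best] if best < 9 else "unknown"
-- ===== Notes on version B (the rewrite author's own statement) =====
-- stated objective: alternative
-- what changed: Replaced the chain of set-membership checks with a priority table: each label maps to a stage index (dict lookup, with a prefix rule for 'review-round:'), one pass over the labels keeps the minimum index, and the stage name is read off an ordered stage list.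
import Mathlib
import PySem

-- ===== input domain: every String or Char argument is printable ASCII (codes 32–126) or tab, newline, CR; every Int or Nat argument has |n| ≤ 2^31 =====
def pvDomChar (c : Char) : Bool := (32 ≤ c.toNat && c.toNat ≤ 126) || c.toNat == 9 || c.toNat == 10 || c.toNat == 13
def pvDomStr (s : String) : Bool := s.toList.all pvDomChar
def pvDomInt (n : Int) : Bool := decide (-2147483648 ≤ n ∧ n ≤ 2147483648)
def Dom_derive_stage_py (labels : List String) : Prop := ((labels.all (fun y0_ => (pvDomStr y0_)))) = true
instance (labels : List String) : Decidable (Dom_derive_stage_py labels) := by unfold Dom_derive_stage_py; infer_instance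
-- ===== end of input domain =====

-- B replaces A's ordered chain of set-membership checks by a label→stage-index priority
-- table and a single min-tracking pass over the labels (objective: alternative decomposition).

-- ===== PORT A =====
-- A's for-loop over the set only tests existence of a 'review-round:' prefix (result is
-- order-independent), ported as `List.any` over the Set's elements.
def derive_stage_py (labels : List String) : String :=
  let label_names : PySem.Set String := PySem.Set.ofList labels
  if PySem.Set.contains label_names "axiom:blocked" then "axiom-blocked"
  else if PySem.Set.contains label_names "sdlc:ready-for-human" then "ready-for-human"
  else if PySem.Set.contains label_names "needs-human" then "needs-human"
  else if label_names.any (fun lb => PySem.Str.startswith lb "review-round:") then "in-review"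
  else if PySem.Set.contains label_names "agent-authored" then "awaiting-review"
  else if PySem.Set.contains label_names "sdlc:implementing" then "implementing"
  else if PySem.Set.contains label_names "sdlc:planning" then "planning"
  else if PySem.Set.contains label_names "sdlc:triaged" then "triaged"
  else if PySem.Set.contains label_names "agent-eligible" then "triage-pending"
  else "unknown"

-- ===== PORT B =====
def pvStages : List String :=
  ["axiom-blocked", "ready-for-human", "needs-human", "in-review", "awaiting-review",
   "implementing", "planning", "triaged", "triage-pending"]

def pvTrigger : PySem.Dict String Nat :=
  PySem.Dict.ofList
    [("axiom:blocked", 0), ("sdlc:ready-for-human", 1), ("needs-human", 2),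
     ("agent-authored", 4), ("sdlc:implementing", 5), ("sdlc:planning", 6),
     ("sdlc:triaged", 7), ("agent-eligible", 8)]

def pvPriority (name : String) : Nat :=
  match pvTrigger.get? name with
  | some i => i
  | none => if PySem.Str.startswith name "review-round:" then 3 else 9

def derive_stage_py_alt (labels : List String) : String :=
  let best := labels.foldl (fun b lb => min b (pvPriority lb)) 9
  if best < 9 then pvStages.getD best "unknown" else "unknown"

-- ===== PRECONDITION & SPEC =====
def Spec_derive_stage_py (labels : List String) (out : String) : Prop := out = derive_stage_py_alt labels
instance (labels : List String) (out : String) : Decidable (Spec_derive_stage_py labels out) := by unfold Spec_derive_stage_py; infer_instance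

-- ===== CLAIM (what is proved, stated in full; the proofs are below) =====
def Claim_equal_derive_stage_py : Prop := ∀ (labels : List String), Dom_derive_stage_py labels → Spec_derive_stage_py labels (derive_stage_py labels)

-- ===== LEMMAS AND PROOFS =====

-- the minimum priority over the labels, as a foldr (proof-side view of B's loop)
def pvBest (labels : List String) : Nat :=
  labels.foldr (fun l r => min (pvPriority l) r) 9

theorem pvPriority_unfold (l : String) :
    pvPriority l =
      if "axiom:blocked" = l then 0 else if "sdlc:ready-for-human" = l then 1
      else if "needs-human" = l then 2 else if "agent-authored" = l then 4
      else if "sdlc:implementing" = l then 5 else if "sdlc:planning" = l then 6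
      else if "sdlc:triaged" = l then 7 else if "agent-eligible" = l then 8
      else if PySem.Str.startswith l "review-round:" then 3 else 9 := by
  have h : pvTrigger = PySem.Dict.mk
      [("axiom:blocked", 0), ("sdlc:ready-for-human", 1), ("needs-human", 2),
       ("agent-authored", 4), ("sdlc:implementing", 5), ("sdlc:planning", 6),
       ("sdlc:triaged", 7), ("agent-eligible", 8)] := by decide
  unfold pvPriority
  rw [h]
  simp only [PySem.Dict.get?_mk_cons, beq_iff_eq]
  split_ifs <;> simp_all [PySem.Dict.get?]

-- pvPriority l = k (k a trigger slot) iff l is that trigger / has the review prefix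
theorem pvPriority_eq_zero (l : String) : pvPriority l = 0 ↔ l = "axiom:blocked" := by
  rw [pvPriority_unfold]; split_ifs <;> simp_all <;> first | decide | (subst_vars; decide) | (intro hh; subst hh; simp_all)
theorem pvPriority_eq_one (l : String) : pvPriority l = 1 ↔ l = "sdlc:ready-for-human" := by
  rw [pvPriority_unfold]; split_ifs <;> simp_all <;> first | decide | (subst_vars; decide) | (intro hh; subst hh; simp_all)
theorem pvPriority_eq_two (l : String) : pvPriority l = 2 ↔ l = "needs-human" := by
  rw [pvPriority_unfold]; split_ifs <;> simp_all <;> first | decide | (subst_vars; decide) | (intro hh; subst hh; simp_all)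
theorem pvPriority_eq_three (l : String) :
    pvPriority l = 3 ↔ PySem.Str.startswith l "review-round:" = true := by
  rw [pvPriority_unfold]; split_ifs <;> simp_all <;> first | decide | (subst_vars; decide) | (intro hh; subst hh; simp_all)
theorem pvPriority_eq_four (l : String) : pvPriority l = 4 ↔ l = "agent-authored" := by
  rw [pvPriority_unfold]; split_ifs <;> simp_all <;> first | decide | (subst_vars; decide) | (intro hh; subst hh; simp_all)
theorem pvPriority_eq_five (l : String) : pvPriority l = 5 ↔ l = "sdlc:implementing" := by
  rw [pvPriority_unfold]; split_ifs <;> simp_all <;> first | decide | (subst_vars; decide) | (intro hh; subst hh; simp_all)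
theorem pvPriority_eq_six (l : String) : pvPriority l = 6 ↔ l = "sdlc:planning" := by
  rw [pvPriority_unfold]; split_ifs <;> simp_all <;> first | decide | (subst_vars; decide) | (intro hh; subst hh; simp_all)
theorem pvPriority_eq_seven (l : String) : pvPriority l = 7 ↔ l = "sdlc:triaged" := by
  rw [pvPriority_unfold]; split_ifs <;> simp_all <;> first | decide | (subst_vars; decide) | (intro hh; subst hh; simp_all)
theorem pvPriority_eq_eight (l : String) : pvPriority l = 8 ↔ l = "agent-eligible" := by
  rw [pvPriority_unfold]; split_ifs <;> simp_all <;> first | decide | (subst_vars; decide) | (intro hh; subst hh; simp_all)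

theorem pvPriority_cases (l : String) :
    pvPriority l = 0 ∨ pvPriority l = 1 ∨ pvPriority l = 2 ∨ pvPriority l = 3 ∨
    pvPriority l = 4 ∨ pvPriority l = 5 ∨ pvPriority l = 6 ∨ pvPriority l = 7 ∨
    pvPriority l = 8 ∨ pvPriority l = 9 := by
  rw [pvPriority_unfold]; split_ifs <;> simp

theorem pvBest_le_iff (labels : List String) (k : Nat) :
    pvBest labels ≤ k ↔ 9 ≤ k ∨ ∃ l ∈ labels, pvPriority l ≤ k := by
  induction labels with
  | nil => simp [pvBest]
  | cons x xs ih =>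
      simp only [pvBest, List.foldr_cons, min_le_iff, List.mem_cons]
      constructor
      · rintro (h | h)
        · exact Or.inr ⟨x, Or.inl rfl, h⟩
        · rcases (ih).mp h with h9 | ⟨l, hl, hpl⟩
          · exact Or.inl h9
          · exact Or.inr ⟨l, Or.inr hl, hpl⟩
      · rintro (h9 | ⟨l, (rfl | hl), hpl⟩)
        · exact Or.inr ((ih).mpr (Or.inl h9))
        · exact Or.inl hpl
        · exact Or.inr ((ih).mpr (Or.inr ⟨l, hl, hpl⟩))

theorem le_pvBest_iff (labels : List String) (k : Nat) :
    k ≤ pvBest labels ↔ k ≤ 9 ∧ ∀ l ∈ labels, k ≤ pvPriority l := by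
  induction labels with
  | nil => simp [pvBest]
  | cons x xs ih =>
      simp only [pvBest, List.foldr_cons, le_min_iff, List.mem_cons]
      rw [show (List.foldr (fun l r => min (pvPriority l) r) 9 xs) = pvBest xs from rfl, ih]
      constructor
      · rintro ⟨hx, h9, hall⟩
        exact ⟨h9, fun l hl => by rcases hl with rfl | hl; exact hx; exact hall l hl⟩
      · rintro ⟨h9, hall⟩
        exact ⟨hall x (Or.inl rfl), h9, fun l hl => hall l (Or.inr hl)⟩

theorem pvBest_le_nine (labels : List String) : pvBest labels ≤ 9 :=
  (pvBest_le_iff labels 9).mpr (Or.inl le_rfl)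

theorem alt_eq_getD (labels : List String) :
    derive_stage_py_alt labels = pvStages.getD (pvBest labels) "unknown" := by
  unfold derive_stage_py_alt
  have hfold : ∀ (xs : List String) (b : Nat), b ≤ 9 →
      xs.foldl (fun b lb => min b (pvPriority lb)) b = min b (pvBest xs) := by
    intro xs
    induction xs with
    | nil => intro b hb; simp [pvBest]; omega
    | cons x xs ih =>
        intro b hb
        simp only [List.foldl_cons]
        rw [ih _ (by omega),
          show pvBest (x :: xs) = min (pvPriority x) (pvBest xs) from rfl]
        omega
  rw [hfold _ _ (by omega)]
  have h9 := pvBest_le_nine labels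
  by_cases h : pvBest labels < 9
  · rw [Nat.min_eq_right (le_of_lt h), if_pos h]
  · have h9' : pvBest labels = 9 := by omega
    simp [h9', pvStages]

theorem pvBest_eq (labels : List String) (k : Nat) (hk : k ≤ 9)
    (hex : k = 9 ∨ ∃ l ∈ labels, pvPriority l = k)
    (hlo : ∀ l ∈ labels, k ≤ pvPriority l) : pvBest labels = k := by
  have hge : k ≤ pvBest labels := (le_pvBest_iff labels k).mpr ⟨hk, hlo⟩
  have hle : pvBest labels ≤ k := by
    rcases hex with rfl | ⟨l, hl, hpl⟩
    · exact pvBest_le_nine labels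
    · exact (pvBest_le_iff labels k).mpr (Or.inr ⟨l, hl, le_of_eq hpl⟩)
  omega

theorem mem_contains_ofList (labels : List String) (x : String) :
    PySem.Set.contains (PySem.Set.ofList labels) x = labels.contains x := by
  simp [PySem.Set.contains, PySem.Set.mem_ofList]

theorem any_ofList (labels : List String) (p : String → Bool) :
    (PySem.Set.ofList labels).any p = labels.any p := by
  rw [Bool.eq_iff_iff]
  simp only [List.any_eq_true]
  constructor
  · rintro ⟨l, hl, hp⟩; exact ⟨l, (PySem.Set.mem_ofList _ _).mp hl, hp⟩
  · rintro ⟨l, hl, hp⟩; exact ⟨l, (PySem.Set.mem_ofList _ _).mpr hl, hp⟩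

-- ===== VERDICT (by name: the statement is the Claim_ definition above) =====
theorem derive_stage_py_spec : Claim_equal_derive_stage_py := by
  intro labels _
  unfold Spec_derive_stage_py
  rw [alt_eq_getD]
  unfold derive_stage_py
  simp only [mem_contains_ofList, any_ofList, List.contains_eq_mem, List.any_eq_true,
    decide_eq_true_eq]
  by_cases c0 : "axiom:blocked" ∈ labels
  · rw [pvBest_eq labels 0 (by omega)
      (Or.inr ⟨_, c0, (pvPriority_eq_zero _).mpr rfl⟩) (fun _ _ => Nat.zero_le _)]
    simp [c0, pvStages]
  by_cases c1 : "sdlc:ready-for-human" ∈ labels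
  · rw [pvBest_eq labels 1 (by omega) (Or.inr ⟨_, c1, (pvPriority_eq_one _).mpr rfl⟩)
      (by intro l hl
          rcases pvPriority_cases l with h|h|h|h|h|h|h|h|h|h <;> try omega
          exact absurd ((pvPriority_eq_zero l).mp h ▸ hl) c0)]
    simp [c0, c1, pvStages]
  by_cases c2 : "needs-human" ∈ labels
  · rw [pvBest_eq labels 2 (by omega) (Or.inr ⟨_, c2, (pvPriority_eq_two _).mpr rfl⟩)
      (by intro l hl
          rcases pvPriority_cases l with h|h|h|h|h|h|h|h|h|h <;> try omega
          · exact absurd ((pvPriority_eq_zero l).mp h ▸ hl) c0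
          · exact absurd ((pvPriority_eq_one l).mp h ▸ hl) c1)]
    simp [c0, c1, c2, pvStages]
  by_cases c3 : ∃ l ∈ labels, PySem.Str.startswith l "review-round:" = true
  · obtain ⟨l3, hl3, hp3⟩ := c3
    rw [pvBest_eq labels 3 (by omega)
      (Or.inr ⟨_, hl3, (pvPriority_eq_three _).mpr hp3⟩)
      (by intro l hl
          rcases pvPriority_cases l with h|h|h|h|h|h|h|h|h|h <;> try omega
          · exact absurd ((pvPriority_eq_zero l).mp h ▸ hl) c0
          · exact absurd ((pvPriority_eq_one l).mp h ▸ hl) c1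
          · exact absurd ((pvPriority_eq_two l).mp h ▸ hl) c2)]
    simp only [if_neg c0, if_neg c1, if_neg c2]
    rw [if_pos ⟨l3, hl3, hp3⟩]
    simp [pvStages]
  by_cases c4 : "agent-authored" ∈ labels
  · rw [pvBest_eq labels 4 (by omega) (Or.inr ⟨_, c4, (pvPriority_eq_four _).mpr rfl⟩)
      (by intro l hl
          rcases pvPriority_cases l with h|h|h|h|h|h|h|h|h|h <;> try omega
          · exact absurd ((pvPriority_eq_zero l).mp h ▸ hl) c0
          · exact absurd ((pvPriority_eq_one l).mp h ▸ hl) c1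
          · exact absurd ((pvPriority_eq_two l).mp h ▸ hl) c2
          · exact absurd ⟨l, hl, (pvPriority_eq_three l).mp h⟩ c3)]
    simp only [if_neg c0, if_neg c1, if_neg c2]
    rw [if_neg c3]
    simp [c4, pvStages]
  by_cases c5 : "sdlc:implementing" ∈ labels
  · rw [pvBest_eq labels 5 (by omega) (Or.inr ⟨_, c5, (pvPriority_eq_five _).mpr rfl⟩)
      (by intro l hl
          rcases pvPriority_cases l with h|h|h|h|h|h|h|h|h|h <;> try omega
          · exact absurd ((pvPriority_eq_zero l).mp h ▸ hl) c0
          · exact absurd ((pvPriority_eq_one l).mp h ▸ hl) c1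
          · exact absurd ((pvPriority_eq_two l).mp h ▸ hl) c2
          · exact absurd ⟨l, hl, (pvPriority_eq_three l).mp h⟩ c3
          · exact absurd ((pvPriority_eq_four l).mp h ▸ hl) c4)]
    simp only [if_neg c0, if_neg c1, if_neg c2]
    rw [if_neg c3]
    simp [c4, c5, pvStages]
  by_cases c6 : "sdlc:planning" ∈ labels
  · rw [pvBest_eq labels 6 (by omega) (Or.inr ⟨_, c6, (pvPriority_eq_six _).mpr rfl⟩)
      (by intro l hl
          rcases pvPriority_cases l with h|h|h|h|h|h|h|h|h|h <;> try omega
          · exact absurd ((pvPriority_eq_zero l).mp h ▸ hl) c0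
          · exact absurd ((pvPriority_eq_one l).mp h ▸ hl) c1
          · exact absurd ((pvPriority_eq_two l).mp h ▸ hl) c2
          · exact absurd ⟨l, hl, (pvPriority_eq_three l).mp h⟩ c3
          · exact absurd ((pvPriority_eq_four l).mp h ▸ hl) c4
          · exact absurd ((pvPriority_eq_five l).mp h ▸ hl) c5)]
    simp only [if_neg c0, if_neg c1, if_neg c2]
    rw [if_neg c3]
    simp [c4, c5, c6, pvStages]
  by_cases c7 : "sdlc:triaged" ∈ labels
  · rw [pvBest_eq labels 7 (by omega) (Or.inr ⟨_, c7, (pvPriority_eq_seven _).mpr rfl⟩)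
      (by intro l hl
          rcases pvPriority_cases l with h|h|h|h|h|h|h|h|h|h <;> try omega
          · exact absurd ((pvPriority_eq_zero l).mp h ▸ hl) c0
          · exact absurd ((pvPriority_eq_one l).mp h ▸ hl) c1
          · exact absurd ((pvPriority_eq_two l).mp h ▸ hl) c2
          · exact absurd ⟨l, hl, (pvPriority_eq_three l).mp h⟩ c3
          · exact absurd ((pvPriority_eq_four l).mp h ▸ hl) c4
          · exact absurd ((pvPriority_eq_five l).mp h ▸ hl) c5
          · exact absurd ((pvPriority_eq_six l).mp h ▸ hl) c6)]
    simp only [if_neg c0, if_neg c1, if_neg c2]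
    rw [if_neg c3]
    simp [c4, c5, c6, c7, pvStages]
  by_cases c8 : "agent-eligible" ∈ labels
  · rw [pvBest_eq labels 8 (by omega) (Or.inr ⟨_, c8, (pvPriority_eq_eight _).mpr rfl⟩)
      (by intro l hl
          rcases pvPriority_cases l with h|h|h|h|h|h|h|h|h|h <;> try omega
          · exact absurd ((pvPriority_eq_zero l).mp h ▸ hl) c0
          · exact absurd ((pvPriority_eq_one l).mp h ▸ hl) c1
          · exact absurd ((pvPriority_eq_two l).mp h ▸ hl) c2
          · exact absurd ⟨l, hl, (pvPriority_eq_three l).mp h⟩ c3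
          · exact absurd ((pvPriority_eq_four l).mp h ▸ hl) c4
          · exact absurd ((pvPriority_eq_five l).mp h ▸ hl) c5
          · exact absurd ((pvPriority_eq_six l).mp h ▸ hl) c6
          · exact absurd ((pvPriority_eq_seven l).mp h ▸ hl) c7)]
    simp only [if_neg c0, if_neg c1, if_neg c2]
    rw [if_neg c3]
    simp [c4, c5, c6, c7, c8, pvStages]
  · rw [pvBest_eq labels 9 (by omega) (Or.inl rfl)
      (by intro l hl
          rcases pvPriority_cases l with h|h|h|h|h|h|h|h|h|h <;> try omega
          · exact absurd ((pvPriority_eq_zero l).mp h ▸ hl) c0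
          · exact absurd ((pvPriority_eq_one l).mp h ▸ hl) c1
          · exact absurd ((pvPriority_eq_two l).mp h ▸ hl) c2
          · exact absurd ⟨l, hl, (pvPriority_eq_three l).mp h⟩ c3
          · exact absurd ((pvPriority_eq_four l).mp h ▸ hl) c4
          · exact absurd ((pvPriority_eq_five l).mp h ▸ hl) c5
          · exact absurd ((pvPriority_eq_six l).mp h ▸ hl) c6
          · exact absurd ((pvPriority_eq_seven l).mp h ▸ hl) c7
          · exact absurd ((pvPriority_eq_eight l).mp h ▸ hl) c8)]
    simp only [if_neg c0, if_neg c1, if_neg c2]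
    rw [if_neg c3]
    simp [c4, c5, c6, c7, c8, pvStages]
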